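-- pv_equiv track=rewrite | github.com/JanuszWitkowski/optimisation-methods | lab2/paleta.py | rowne_slowniki
-- ===== SOURCE A (Python) =====
-- def rowne_slowniki(slownik1, slownik2) -> bool:
--     for key in slownik1:
--         if key not in slownik2:
--             return False
--         if slownik1[key] != slownik2[key]:
--             return False
--     for key in slownik2:
--         if key not in slownik1:
--             return False
--         if slownik1[key] != slownik2[key]:
--             return False
--     return True
-- ===== SOURCE B (Python) =====
-- def rowne_slowniki(slownik1, slownik2) -> bool:
--     return sorted(slownik1.items(), key=lambda kv: kv[0]) == sorted(slownik2.items(), key=lambda kv: kv[0])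
-- ===== Notes on version B (the rewrite author's own statement) =====
-- stated objective: alternative
-- what changed: B canonicalises both dicts by sorting their item lists by key and compares the two sorted lists for equality, instead of A's two membership-and-value scans with early return.
import Mathlib
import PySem

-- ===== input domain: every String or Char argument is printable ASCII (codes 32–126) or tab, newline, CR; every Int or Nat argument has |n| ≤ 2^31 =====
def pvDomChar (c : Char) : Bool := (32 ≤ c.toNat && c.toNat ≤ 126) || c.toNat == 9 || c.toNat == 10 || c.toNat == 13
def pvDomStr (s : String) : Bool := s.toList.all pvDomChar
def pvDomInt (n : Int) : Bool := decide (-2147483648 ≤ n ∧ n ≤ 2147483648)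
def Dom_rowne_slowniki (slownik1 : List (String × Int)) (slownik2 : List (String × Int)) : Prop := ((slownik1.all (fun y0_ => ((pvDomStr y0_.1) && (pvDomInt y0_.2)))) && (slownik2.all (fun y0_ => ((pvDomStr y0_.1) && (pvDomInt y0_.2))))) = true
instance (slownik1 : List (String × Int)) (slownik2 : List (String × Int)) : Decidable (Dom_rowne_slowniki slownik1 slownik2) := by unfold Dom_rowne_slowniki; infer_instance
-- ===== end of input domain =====

-- B canonicalises both dicts by sorting their item lists by key and compares the sorted lists,
-- instead of A's two membership-and-value scans (objective: alternative algorithm).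
-- Dicts are association lists; lookup is first match (List.lookup).

-- ===== PORT A =====
-- one of A's 'for key in src: if key not in other / if full[key] != other[key]' loops:
-- 'full' stays the dict whose keys are being iterated (so 'full.lookup k' is 'slownikX[key]')
def rsPass (full other : List (String × Int)) : List (String × Int) → Bool
  | [] => true
  | (k, _) :: rest =>
    match List.lookup k other with
    | none => false                      -- 'key not in other'
    | some w =>
      match List.lookup k full with
      | none => false                    -- unreachable: k is a key of full
      | some v => if v != w then false else rsPass full other rest

def rowne_slowniki (slownik1 : List (String × Int)) (slownik2 : List (String × Int)) : Bool :=
  rsPass slownik1 slownik2 slownik1 && rsPass slownik2 slownik1 slownik2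

-- ===== PORT B =====
-- sorted(slownikX.items(), key=lambda kv: kv[0]) on each side, then list equality
def rowne_slowniki_alt (slownik1 : List (String × Int)) (slownik2 : List (String × Int)) : Bool :=
  PySem.List.sorted slownik1 (fun kv => kv.1) == PySem.List.sorted slownik2 (fun kv => kv.1)

-- ===== PRECONDITION & SPEC =====
-- Pre_ only requires the association lists to have no duplicate keys: a duplicate-key list does not
-- encode any Python dict (dicts have unique keys), so no input the Python A accepts is excluded.
def Pre_rowne_slowniki (slownik1 : List (String × Int)) (slownik2 : List (String × Int)) : Prop :=
  (slownik1.map Prod.fst).Nodup ∧ (slownik2.map Prod.fst).Nodup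
instance (slownik1 : List (String × Int)) (slownik2 : List (String × Int)) : Decidable (Pre_rowne_slowniki slownik1 slownik2) := by unfold Pre_rowne_slowniki; infer_instance

def pvWitness_rowne_slowniki : (List (String × Int)) × (List (String × Int)) :=
  ([("a", 1), ("b", 2)], [("b", 2), ("a", 1)])

def Spec_rowne_slowniki (slownik1 : List (String × Int)) (slownik2 : List (String × Int)) (out : Bool) : Prop := out = rowne_slowniki_alt slownik1 slownik2
instance (slownik1 : List (String × Int)) (slownik2 : List (String × Int)) (out : Bool) : Decidable (Spec_rowne_slowniki slownik1 slownik2 out) := by unfold Spec_rowne_slowniki; infer_instance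

-- ===== CLAIM =====
def Claim_equal_rowne_slowniki : Prop := ∀ (slownik1 : List (String × Int)) (slownik2 : List (String × Int)), Dom_rowne_slowniki slownik1 slownik2 → Pre_rowne_slowniki slownik1 slownik2 → Spec_rowne_slowniki slownik1 slownik2 (rowne_slowniki slownik1 slownik2)

-- ===== LEMMAS AND PROOFS =====

-- first-match lookup facts on association lists
theorem lookup_of_mem_nodup {l : List (String × Int)} {k : String} {v : Int}
    (hnd : (l.map Prod.fst).Nodup) (hm : (k, v) ∈ l) : List.lookup k l = some v := by
  induction l with
  | nil => simp at hm
  | cons p rest ih =>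
    obtain ⟨pk, pv⟩ := p
    simp only [List.map_cons, List.nodup_cons] at hnd
    rcases List.mem_cons.1 hm with h | h
    · cases h; simp [List.lookup]
    · have hk : k ≠ pk := by
        intro he; exact hnd.1 (he ▸ (List.mem_map.2 ⟨(k, v), h, rfl⟩))
      simp [List.lookup, beq_false_of_ne hk, ih hnd.2 h]

theorem mem_of_lookup_some {l : List (String × Int)} {k : String} {v : Int}
    (h : List.lookup k l = some v) : (k, v) ∈ l := by
  induction l with
  | nil => simp [List.lookup] at h
  | cons p rest ih =>
    obtain ⟨pk, pv⟩ := p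
    by_cases he : k = pk
    · subst he; simp [List.lookup] at h; simp [h]
    · simp only [List.lookup, beq_false_of_ne he] at h
      exact List.mem_cons.2 (Or.inr (ih h))

-- A's pass over the keys of 'full' is the 'all' of the value check, as long as what is iterated
-- is part of 'full' (so the inner 'full.lookup' always succeeds)
theorem rsPass_eq_all {full other : List (String × Int)}
    (hnd : (full.map Prod.fst).Nodup) :
    ∀ l : List (String × Int), l ⊆ full →
      rsPass full other l = l.all (fun p => List.lookup p.1 other == some p.2) := by
  intro l
  induction l with
  | nil => intro _; simp [rsPass]
  | cons p rest ih =>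
    intro hsub
    obtain ⟨k, vp⟩ := p
    have hmem : (k, vp) ∈ full := hsub (List.mem_cons_self ..)
    have hfl : List.lookup k full = some vp := lookup_of_mem_nodup hnd hmem
    have hrest : rest ⊆ full := fun x hx => hsub (List.mem_cons_of_mem _ hx)
    cases ho : List.lookup k other with
    | none => simp [rsPass, ho]
    | some w =>
      by_cases hvw : vp = w
      · subst hvw
        simp [rsPass, ho, hfl, ih hrest]
      · have : (vp != w) = true := bne_iff_ne.2 hvw
        simp [rsPass, ho, hfl, this, Ne.symm hvw]

-- a nodup-keyed list is itself nodup
theorem nodup_of_keys_nodup {l : List (String × Int)}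
    (h : (l.map Prod.fst).Nodup) : l.Nodup :=
  (List.Nodup.of_map Prod.fst) h

-- A succeeds exactly when the two association lists are permutations of each other
theorem A_true_iff_perm {d1 d2 : List (String × Int)}
    (h1 : (d1.map Prod.fst).Nodup) (h2 : (d2.map Prod.fst).Nodup) :
    rowne_slowniki d1 d2 = true ↔ d1.Perm d2 := by
  unfold rowne_slowniki
  rw [rsPass_eq_all h1 d1 (List.Subset.refl d1),
      rsPass_eq_all h2 d2 (List.Subset.refl d2),
      Bool.and_eq_true, List.all_eq_true, List.all_eq_true]
  constructor
  · rintro ⟨hf, hb⟩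
    refine (List.perm_ext_iff_of_nodup (nodup_of_keys_nodup h1) (nodup_of_keys_nodup h2)).2 ?_
    rintro ⟨k, v⟩
    constructor
    · intro hm
      exact mem_of_lookup_some (beq_iff_eq.1 (hf _ hm))
    · intro hm
      exact mem_of_lookup_some (beq_iff_eq.1 (hb _ hm))
  · intro hp
    constructor
    · intro p hm
      exact beq_iff_eq.2 (lookup_of_mem_nodup h2 (hp.mem_iff.1 hm))
    · intro p hm
      exact beq_iff_eq.2 (lookup_of_mem_nodup h1 (hp.mem_iff.2 hm))

-- a key-sorted nodup-keyed list is strictly increasing in the key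
theorem sorted_pairwise_lt {d : List (String × Int)}
    (h : (d.map Prod.fst).Nodup) :
    (PySem.List.sorted d (fun kv => kv.1)).Pairwise (fun a b => a.1 < b.1) := by
  have hle : (PySem.List.sorted d (fun kv => kv.1)).Pairwise (fun a b => a.1 ≤ b.1) :=
    PySem.List.sorted_pairwise d (fun kv => kv.1)
  have hperm : (PySem.List.sorted d (fun kv => kv.1)).Perm d :=
    PySem.List.sorted_perm d (fun kv => kv.1) false
  have hnd : ((PySem.List.sorted d (fun kv => kv.1)).map Prod.fst).Nodup :=
    ((hperm.map Prod.fst).nodup_iff).2 h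
  have hne : (PySem.List.sorted d (fun kv => kv.1)).Pairwise (fun a b => a.1 ≠ b.1) :=
    (List.pairwise_map).1 hnd
  exact (hle.and hne).imp (fun h => lt_of_le_of_ne h.1 h.2)

-- B succeeds exactly when the two association lists are permutations of each other
theorem B_true_iff_perm {d1 d2 : List (String × Int)}
    (h2 : (d2.map Prod.fst).Nodup) :
    rowne_slowniki_alt d1 d2 = true ↔ d1.Perm d2 := by
  unfold rowne_slowniki_alt
  rw [beq_iff_eq]
  constructor
  · intro he
    have p1 : (PySem.List.sorted d1 (fun kv => kv.1)).Perm d1 :=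
      PySem.List.sorted_perm d1 (fun kv => kv.1) false
    have p2 : (PySem.List.sorted d2 (fun kv => kv.1)).Perm d2 :=
      PySem.List.sorted_perm d2 (fun kv => kv.1) false
    exact p1.symm.trans (he ▸ p2)
  · intro hp
    have p2 : (PySem.List.sorted d2 (fun kv => kv.1)).Perm d1 :=
      (PySem.List.sorted_perm d2 (fun kv => kv.1) false).trans hp.symm
    have hlt := sorted_pairwise_lt h2
    exact PySem.List.sorted_eq_of_perm_of_pairwise_lt d1 _ (fun kv => kv.1) p2 hlt

-- ===== VERDICT =====
theorem rowne_slowniki_spec : Claim_equal_rowne_slowniki := by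
  intro d1 d2 _ hpre
  obtain ⟨h1, h2⟩ := hpre
  unfold Spec_rowne_slowniki
  rw [Bool.eq_iff_iff, A_true_iff_perm h1 h2, B_true_iff_perm h2]
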